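-- pv_equiv track=rewrite | github.com/lapssh/codder_learning | courses/stepik/python/018_orfo.py | orfo_check
-- ===== SOURCE A (Python) =====
-- def orfo_check(orfo_dict, text):
--     errors_count = 0
--     orfo = []
--     for i in orfo_dict:
--         orfo.append(i.lower())
--     set_errors = set()
--     for i in text:
--         line = i.split()
--         for words in line:
--             low_word = words.lower()
--             if low_word not in orfo:
--                 set_errors.add(low_word)
--     return set_errors
-- ===== SOURCE B (Python) =====
-- def orfo_check(orfo_dict, text):
--     # Phase 1: record every lowercased text word (first occurrence) unconditionally.
--     words = dict.fromkeys(w.lower() for line in text for w in line.split())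
--     # Phase 2: delete the dictionary entries from that table.
--     for d in orfo_dict:
--         words.pop(d.lower(), None)
--     return set(words)
-- ===== Notes on version B (the rewrite author's own statement) =====
-- stated objective: faster
-- what changed: Instead of testing each text word against the lowercased dictionary inside the traversal, B first records all lowercased text words unconditionally in an ordered table (dict.fromkeys) and then prunes it by a separate deletion pass over the dictionary; there is no per-word membership branch at all.
import Mathlib
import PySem

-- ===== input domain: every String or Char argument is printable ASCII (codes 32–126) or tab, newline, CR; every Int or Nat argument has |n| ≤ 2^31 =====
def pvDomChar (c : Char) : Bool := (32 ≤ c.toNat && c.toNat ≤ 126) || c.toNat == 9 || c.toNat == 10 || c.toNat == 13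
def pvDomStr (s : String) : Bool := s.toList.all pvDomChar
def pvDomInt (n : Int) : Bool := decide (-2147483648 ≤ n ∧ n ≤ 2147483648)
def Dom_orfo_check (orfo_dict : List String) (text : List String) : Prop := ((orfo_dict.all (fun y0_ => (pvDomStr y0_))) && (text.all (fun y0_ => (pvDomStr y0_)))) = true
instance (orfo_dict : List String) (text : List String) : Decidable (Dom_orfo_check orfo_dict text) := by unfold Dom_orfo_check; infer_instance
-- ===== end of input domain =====

-- B replaces A's per-word membership branch by two staged passes: record every lowercased
-- text word in an ordered table (dict.fromkeys), then prune it by deleting the dictionary entries.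

-- ===== PORT A =====
def orfo_check (orfo_dict : List String) (text : List String) : List String :=
  let orfo := orfo_dict.foldl (fun acc i => acc ++ [PySem.Str.lower i]) []
  text.foldl (fun set_errors i =>
    (PySem.Str.split₀ i).foldl (fun set_errors words =>
      let low_word := PySem.Str.lower words
      if low_word ∈ orfo then set_errors else PySem.Set.add set_errors low_word)
      set_errors)
    []

-- ===== PORT B =====
def orfo_check_alt (orfo_dict : List String) (text : List String) : List String :=
  -- dict.fromkeys over the lowercased text words = ordered dedup (PySem.List.dedup)
  let words : List String :=
    PySem.List.dedup (text.flatMap (fun line => (PySem.Str.split₀ line).map PySem.Str.lower))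
  -- words.pop(k, None): the key list has no duplicates, so popping a key is List.erase on it
  let remaining := orfo_dict.foldl (fun ws d => ws.erase (PySem.Str.lower d)) words
  PySem.Set.ofList remaining

-- ===== PRECONDITION & SPEC =====
def Spec_orfo_check (orfo_dict : List String) (text : List String) (out : List String) : Prop := out = orfo_check_alt orfo_dict text
instance (orfo_dict : List String) (text : List String) (out : List String) : Decidable (Spec_orfo_check orfo_dict text out) := by unfold Spec_orfo_check; infer_instance

-- ===== CLAIM =====
def Claim_equal_orfo_check : Prop := ∀ (orfo_dict : List String) (text : List String), Dom_orfo_check orfo_dict text → Spec_orfo_check orfo_dict text (orfo_check orfo_dict text)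

-- ===== LEMMAS AND PROOFS =====

-- A's dictionary-lowering loop builds the lowercased map.
theorem pv_foldl_append_map {α β : Type} (f : α → β) (l : List α) (acc : List β) :
    l.foldl (fun acc i => acc ++ [f i]) acc = acc ++ l.map f := by
  induction l generalizing acc with
  | nil => simp
  | cons x xs ih => simp [List.foldl, ih]

-- A's nested loop over lines is a single fold over the flattened word list.
theorem pv_foldl_flatMap {α β γ : Type} (g : α → List β) (step : γ → β → γ)
    (l : List α) (init : γ) :
    l.foldl (fun s i => (g i).foldl step s) init = (l.flatMap g).foldl step init := by
  induction l generalizing init with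
  | nil => rfl
  | cons x xs ih => simp [List.foldl, ih]

-- A's filtered-add fold from the empty set is a filter of the deduplicated mapped list.
theorem pv_fold_eq_filter (f : String → String) (W T : List String) :
    W.foldl (fun s w => if f w ∈ T then s else PySem.Set.add s (f w)) [] =
      (PySem.Set.ofList (W.map f)).filter (fun w => !(PySem.Set.contains T w)) := by
  induction W using List.reverseRecOn with
  | nil => rfl
  | append_singleton xs x ih =>
    rw [List.foldl_append]
    simp only [List.map_append, List.map_cons, List.map_nil, List.foldl]
    rw [PySem.Set.ofList_append_singleton]
    rw [ih, PySem.Set.add_eq_ite]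
    by_cases hT : f x ∈ T
    · simp only [hT, if_pos]
      by_cases hx : f x ∈ PySem.Set.ofList (xs.map f)
      · simp [hx]
      · simp [hx, List.filter_append, hT]
    · rw [if_neg hT, PySem.Set.add_eq_ite]
      by_cases hx : f x ∈ PySem.Set.ofList (xs.map f)
      · simp [hx, hT]
      · simp [hx, List.filter_append, hT]

-- B's deletion pass over a duplicate-free table is a single filter.
theorem pv_erase_fold (ds : List String) (l : List String) (h : l.Nodup) :
    ds.foldl (fun ws d => ws.erase (PySem.Str.lower d)) l =
      l.filter (fun w => !((ds.map PySem.Str.lower).contains w)) := by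
  induction ds generalizing l with
  | nil => simp
  | cons d ds ih =>
    simp only [List.foldl]
    rw [h.erase_eq_filter, ih _ (h.filter _)]
    rw [List.filter_filter]
    apply List.filter_congr
    intro w _
    by_cases hw : w = PySem.Str.lower d <;> simp [hw]

theorem pv_orfo_eq (orfo_dict text : List String) :
    orfo_check orfo_dict text = orfo_check_alt orfo_dict text := by
  unfold orfo_check orfo_check_alt
  rw [pv_foldl_append_map]
  simp only [List.nil_append]
  rw [pv_foldl_flatMap PySem.Str.split₀]
  refine (pv_fold_eq_filter PySem.Str.lower (text.flatMap PySem.Str.split₀)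
    (orfo_dict.map PySem.Str.lower)).trans ?_
  rw [← List.map_flatMap]
  simp only [PySem.List.dedup_eq_ofList]
  rw [pv_erase_fold _ _ (PySem.Set.nodup_ofList _)]
  rw [PySem.Set.ofList_eq_self_of_nodup _ (List.Nodup.filter _ (PySem.Set.nodup_ofList _))]
  apply List.filter_congr
  intro w _
  simp [PySem.Set.contains_eq_listContains]

-- ===== VERDICT =====
theorem orfo_check_spec : Claim_equal_orfo_check := by
  intro orfo_dict text _
  exact pv_orfo_eq orfo_dict text
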